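-- pv_equiv track=rewrite | github.com/DanyloRudavets/prg-basics | 13-Test3/p11.py | f
-- ===== SOURCE A (Python) =====
-- def f(n):
--     l=[]
--     n=str(n)
--     for i in n:
--         if int(i)%2!=0:
--             l.append(int(i))
--     if  len(l)==0:
--         return -1
--     else:
--         return max(l)-min(l)
-- ===== SOURCE B (Python) =====
-- def f(n):
--     mn = mx = None
--     for ch in str(n):
--         d = int(ch)
--         if d % 2:
--             if mn is None:
--                 mn = mx = d
--             else:
--                 if d < mn:
--                     mn = d
--                 if d > mx:
--                     mx = d
--     return -1 if mn is None else mx - mn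
-- ===== Notes on version B (the rewrite author's own statement) =====
-- stated objective: simpler
-- what changed: Single pass keeping running min/max accumulators instead of building a list of odd digits and scanning it twice with max() and min().
import Mathlib
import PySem

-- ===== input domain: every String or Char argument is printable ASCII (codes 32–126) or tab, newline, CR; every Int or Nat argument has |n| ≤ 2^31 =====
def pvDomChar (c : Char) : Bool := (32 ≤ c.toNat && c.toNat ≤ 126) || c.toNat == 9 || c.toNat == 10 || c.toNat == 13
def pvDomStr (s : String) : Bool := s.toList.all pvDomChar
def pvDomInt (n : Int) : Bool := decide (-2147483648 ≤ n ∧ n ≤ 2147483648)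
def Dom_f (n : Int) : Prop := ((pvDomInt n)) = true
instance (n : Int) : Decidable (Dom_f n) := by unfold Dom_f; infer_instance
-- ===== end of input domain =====

-- B keeps running min/max accumulators in one pass instead of building a list of odd digits
-- and scanning it twice with max() and min(); same result, O(1) extra space.

-- int(i) for a single char; exact on digit characters '0'-'9', which is all that occurs
-- inside Pre_f (n ≥ 0, so str(n) is digits only).
def pvDigit (c : Char) : Int := (c.toNat : Int) - 48

-- ===== PORT A =====
def f (n : Int) : Int :=
  let s := PySem.Int.toChars n
  let l := s.foldl (fun acc c =>
    if PySem.Int.mod (pvDigit c) 2 ≠ 0 then acc ++ [pvDigit c] else acc) ([] : List Int)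
  if l.length = 0 then -1
  else (PySem.List.max? l (fun x => x)).getD 0 - (PySem.List.min? l (fun x => x)).getD 0

-- ===== PORT B =====
def pvUpd (st : Option (Int × Int)) (d : Int) : Option (Int × Int) :=
  match st with
  | none => some (d, d)
  | some (mn, mx) => some ((if d < mn then d else mn), (if d > mx then d else mx))

def f_alt (n : Int) : Int :=
  let st := (PySem.Int.toChars n).foldl (fun st c =>
    if PySem.Int.mod (pvDigit c) 2 ≠ 0 then pvUpd st (pvDigit c) else st) (none : Option (Int × Int))
  match st with
  | none => -1
  | some (mn, mx) => mx - mn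

-- ===== PRECONDITION & SPEC =====
-- Pre_f excludes negative n, on which the Python A (and B alike) raises ValueError at int('-').
def Pre_f (n : Int) : Prop := 0 ≤ n
instance (n : Int) : Decidable (Pre_f n) := by unfold Pre_f; infer_instance
def pvWitness_f : Int := 1357

def Spec_f (n : Int) (out : Int) : Prop := out = f_alt n
instance (n : Int) (out : Int) : Decidable (Spec_f n out) := by unfold Spec_f; infer_instance

-- ===== CLAIM (what is proved, stated in full; the proofs are below) =====
def Claim_equal_f : Prop := ∀ (n : Int), Dom_f n → Pre_f n → Spec_f n (f n)

-- ===== LEMMAS AND PROOFS =====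

-- folding pvUpd from a some-state is the pair of running min and running max
theorem foldl_upd_some (L : List Int) (mn mx : Int) :
    L.foldl pvUpd (some (mn, mx)) = some (L.foldl min mn, L.foldl max mx) := by
  induction L generalizing mn mx with
  | nil => rfl
  | cons d t ih =>
    have h1 : (if d < mn then d else mn) = min mn d := by
      simp [min_def]; split_ifs <;> omega
    have h2 : (if d > mx then d else mx) = max mx d := by
      simp [max_def]; split_ifs <;> omega
    simp [List.foldl, pvUpd, h1, h2, ih]

-- ===== VERDICT (by name: the statement is the Claim_ definition above) =====
theorem f_spec : Claim_equal_f := by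
  intro n _ _
  show f n = f_alt n
  unfold f f_alt
  simp only [PySem.List.foldl_append_ite (p := fun c => PySem.Int.mod (pvDigit c) 2 ≠ 0)
        (f := pvDigit),
      PySem.List.foldl_ite_eq_foldl_filter (p := fun c => PySem.Int.mod (pvDigit c) 2 ≠ 0)
        (fun st c => pvUpd st (pvDigit c)),
      ← List.foldl_map, List.nil_append]
  cases hL : (List.filter (fun c => decide (PySem.Int.mod (pvDigit c) 2 ≠ 0)) (PySem.Int.toChars n)).map pvDigit with
  | nil => simp
  | cons x t =>
    simp only [List.foldl_cons, pvUpd, foldl_upd_some, List.length_cons,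
      PySem.List.max?_id_cons, PySem.List.min?_id_cons, Option.getD_some]
    simp
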